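-- pv_equiv track=rewrite | github.com/vboron/SHM | hydrophob_changes.py | parse_abnum_data
-- ===== SOURCE A (Python) =====
-- def parse_abnum_data(num_res):
--     split_res_num = num_res.split('\n')
--
--     def make_LH_list(chain):
--         num_res_list = [i.strip() for i in split_res_num if i.strip().startswith(chain)]
--         num_res_list = [i.split(' ') for i in num_res_list]
--         return num_res_list
--
--     num_res_l = []
--     num_res_h = []
--     if any('L' in line for line in split_res_num):
--         num_res_l = make_LH_list('L')
--     if any('H' in line for line in split_res_num):
--         num_res_h = make_LH_list('H')
--     return num_res_l, num_res_h
-- ===== SOURCE B (Python) =====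
-- def parse_abnum_data(num_res):
--     num_res_l = []
--     num_res_h = []
--     for line in num_res.split('\n'):
--         s = line.strip()
--         if s.startswith('L'):
--             num_res_l.append(s.split(' '))
--         elif s.startswith('H'):
--             num_res_h.append(s.split(' '))
--     return num_res_l, num_res_h
-- ===== Notes on version B (the rewrite author's own statement) =====
-- stated objective: simpler
-- what changed: Replaces A's two any(...)-guarded filter+map passes (four scans of the lines) with one fused loop that strips each line once and appends its split to the matching chain list; the containment guards are dropped as redundant, since a stripped line can only start with a chain letter the raw line contains.
import Mathlib
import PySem

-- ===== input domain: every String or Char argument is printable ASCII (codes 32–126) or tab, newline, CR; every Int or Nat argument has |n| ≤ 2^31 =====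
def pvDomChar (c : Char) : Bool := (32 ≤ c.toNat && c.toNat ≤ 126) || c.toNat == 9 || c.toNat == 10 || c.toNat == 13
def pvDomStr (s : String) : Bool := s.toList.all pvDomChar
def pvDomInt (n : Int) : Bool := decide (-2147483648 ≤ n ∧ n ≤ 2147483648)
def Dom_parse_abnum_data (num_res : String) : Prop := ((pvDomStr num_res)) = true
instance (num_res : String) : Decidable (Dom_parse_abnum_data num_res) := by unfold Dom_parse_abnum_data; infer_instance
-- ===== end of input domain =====

-- B replaces A's two any(...)-guarded filter+map passes with one fused loop over the lines;
-- objective: simpler (one pass, guards dropped as redundant).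


-- s.split(sep) for a nonempty literal sep (split? is none only for sep = "")
def pvSplit (s sep : String) : List String := (PySem.Str.split? s sep).getD []

-- ===== PORT A =====
-- [i.strip() for i in lines if i.strip().startswith(chain)] then [i.split(' ') for i in …]
def pvMakeLHList (lines : List String) (chain : String) : List (List String) :=
  ((lines.filter (fun i => PySem.Str.startswith (PySem.Str.strip i) chain)).map
      (fun i => PySem.Str.strip i)).map (fun i => pvSplit i " ")

def parse_abnum_data (num_res : String) : List (List String) × List (List String) :=
  let split_res_num := pvSplit num_res "\n"
  let num_res_l :=
    if split_res_num.any (fun line => PySem.Str.isIn "L" line) then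
      pvMakeLHList split_res_num "L"
    else []
  let num_res_h :=
    if split_res_num.any (fun line => PySem.Str.isIn "H" line) then
      pvMakeLHList split_res_num "H"
    else []
  (num_res_l, num_res_h)

-- ===== PORT B =====
def pvAltStep (acc : List (List String) × List (List String)) (line : String) :
    List (List String) × List (List String) :=
  let s := PySem.Str.strip line
  if PySem.Str.startswith s "L" then (acc.1 ++ [pvSplit s " "], acc.2)
  else if PySem.Str.startswith s "H" then (acc.1, acc.2 ++ [pvSplit s " "])
  else acc

def parse_abnum_data_alt (num_res : String) : List (List String) × List (List String) :=
  (pvSplit num_res "\n").foldl pvAltStep ([], [])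

-- ===== PRECONDITION & SPEC =====
def Spec_parse_abnum_data (num_res : String) (out : List (List String) × List (List String)) : Prop := out = parse_abnum_data_alt num_res
instance (num_res : String) (out : List (List String) × List (List String)) : Decidable (Spec_parse_abnum_data num_res out) := by unfold Spec_parse_abnum_data; infer_instance

-- ===== CLAIM (what is proved, stated in full; the proofs are below) =====
def Claim_equal_parse_abnum_data : Prop := ∀ (num_res : String), Dom_parse_abnum_data num_res → Spec_parse_abnum_data num_res (parse_abnum_data num_res)

-- ===== LEMMAS AND PROOFS =====

-- the strip of a string is a sublist of it
lemma strip_sublist (cs : List Char) : (PySem.Chars.strip cs).Sublist cs := by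
  unfold PySem.Chars.strip PySem.Chars.rstrip PySem.Chars.lstrip
  have h1 : (List.dropWhile PySem.Chars.isspace
      (List.dropWhile PySem.Chars.isspace cs).reverse).Sublist
      (List.dropWhile PySem.Chars.isspace cs).reverse := List.dropWhile_sublist _
  have h2 := h1.reverse
  simp only [List.reverse_reverse] at h2
  exact h2.trans (List.dropWhile_sublist _)

-- a stripped line starting with c contains c
lemma isIn_of_startswith_strip (s : String) (c : Char) :
    PySem.Str.startswith (PySem.Str.strip s) (String.singleton c) = true →
    PySem.Str.isIn (String.singleton c) s = true := by
  intro h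
  rw [PySem.Str.startswith_eq] at h
  unfold PySem.Chars.startswith at h
  have hpre : (String.singleton c).toList <+: (PySem.Str.strip s).toList :=
    List.isPrefixOf_iff_prefix.mp h
  have hmem : c ∈ (PySem.Str.strip s).toList := by
    rcases hpre with ⟨t, ht⟩
    simp [String.singleton] at ht
    simp [← ht]
  rw [PySem.Str.toList_strip] at hmem
  have hmem' : c ∈ s.toList := (strip_sublist s.toList).mem hmem
  rw [PySem.Str.isIn_iff_infix]
  have : (String.singleton c).toList = [c] := by simp [String.singleton]
  rw [this]
  obtain ⟨t1, t2, ht⟩ := List.mem_iff_append.mp hmem'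
  exact ⟨t1, t2, by simp [ht]⟩

-- "L" and "H" cannot both be prefixes
lemma not_startswith_H_of_L (l : List Char) :
    PySem.Chars.startswith l ['L'] = true → PySem.Chars.startswith l ['H'] = false := by
  intro h
  unfold PySem.Chars.startswith at h ⊢
  cases l with
  | nil => simp [List.isPrefixOf] at h
  | cons a t =>
    simp [List.isPrefixOf] at h ⊢
    intro hh
    exact absurd (hh.trans h.symm) (by decide)

-- the fused loop accumulates exactly the two filtered-map lists
lemma loop_eq (lines : List String) (accL accH : List (List String)) :
    lines.foldl pvAltStep (accL, accH) =
      (accL ++ pvMakeLHList lines "L", accH ++ pvMakeLHList lines "H") := by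
  induction lines generalizing accL accH with
  | nil => simp [pvMakeLHList]
  | cons x xs ih =>
    simp only [List.foldl_cons]
    by_cases hL : PySem.Chars.startswith (PySem.Chars.strip x.toList) ['L'] = true
    · have hH := not_startswith_H_of_L _ hL
      simp [pvAltStep, hL, hH, ih, pvMakeLHList]
    · by_cases hH : PySem.Chars.startswith (PySem.Chars.strip x.toList) ['H'] = true
      · simp [pvAltStep, hL, hH, ih, pvMakeLHList]
      · simp [pvAltStep, hL, hH, ih, pvMakeLHList]

-- if no line contains c, the chain-filtered list is empty
lemma make_nil (lines : List String) (c : Char)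
    (h : ∀ x ∈ lines, PySem.Str.isIn (String.singleton c) x = false) :
    pvMakeLHList lines (String.singleton c) = [] := by
  unfold pvMakeLHList
  have : lines.filter (fun i => PySem.Str.startswith (PySem.Str.strip i) (String.singleton c)) = [] := by
    rw [List.filter_eq_nil_iff]
    intro a ha hsw
    exact absurd (isIn_of_startswith_strip a c hsw) (by simpa using h a ha)
  rw [this]; rfl

-- ===== VERDICT (by name: the statement is the Claim_ definition above) =====
theorem parse_abnum_data_spec : Claim_equal_parse_abnum_data := by
  intro num_res _
  unfold Spec_parse_abnum_data parse_abnum_data parse_abnum_data_alt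
  rw [loop_eq]
  simp only [List.nil_append, Prod.mk.injEq]
  constructor
  · split_ifs with h
    · rfl
    · exact (make_nil _ 'L' (by simpa using h)).symm
  · split_ifs with h
    · rfl
    · exact (make_nil _ 'H' (by simpa using h)).symm
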